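-- pv_equiv track=rewrite | github.com/meggangreen/advent-code-2018 | day-05.py | make_all_preened_and_reacted_products
-- ===== SOURCE A (Python) =====
-- from string import ascii_uppercase
--
-- def catalyze_reaction(polymer):
--     reaction = list(polymer)
--
--     i = 0
--     j = 1
--     while j < len(reaction):
--         if reaction[i] == 0 and i > 0:
--             i += -1
--         elif (reaction[i] == 0 and i == 0) or reaction[i].swapcase() != reaction[j]:
--             i = j
--             j += 1
--         else:  # reaction!
--             reaction[i] = 0
--             reaction[j] = 0
--             j += 1
--             if i == 0:
--                 i = j
--                 j += 1
--             else:
--                 i += -1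
--
--     return reaction
--
-- def collapse_product(reaction):
--     product = ''.join([unit for unit in reaction if unit != 0])
--     return product
--
-- def preen_polymer(polymer, unit):
--     preened_polymer = list(polymer)
--     # unit = unit.upper()
--
--     for i in range(len(preened_polymer)):
--         if preened_polymer[i].upper() == unit:
--             preened_polymer[i] = 0
--
--     return ''.join([p for p in preened_polymer if p != 0])
--
-- def make_all_preened_and_reacted_products(polymer):
--     products = {}
--
--     for char in list(ascii_uppercase):
--         prod = collapse_product(catalyze_reaction(preen_polymer(polymer, char)))
--         if not products.get(len(prod)):
--             products[len(prod)] = []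
--         products[len(prod)].append(prod)
--
--     return products
-- ===== SOURCE B (Python) =====
-- from string import ascii_uppercase
--
-- def make_all_preened_and_reacted_products(polymer):
--     products = {}
--     for char in ascii_uppercase:
--         # fused single pass: skip preened units, react on an explicit stack
--         stack = []
--         for unit in polymer:
--             if unit.upper() == char:
--                 continue
--             if stack and stack[-1].swapcase() == unit:
--                 stack.pop()
--             else:
--                 stack.append(unit)
--         prod = ''.join(stack)
--         products.setdefault(len(prod), []).append(prod)
--     return products
-- ===== Notes on version B (the rewrite author's own statement) =====
-- stated objective: faster
-- what changed: Replaces the sentinel-array two-pointer reaction plus separate preen and collapse passes by one fused forward pass per letter with an explicit stack, and the get-truthiness dict initialisation by setdefault.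
import Mathlib
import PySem

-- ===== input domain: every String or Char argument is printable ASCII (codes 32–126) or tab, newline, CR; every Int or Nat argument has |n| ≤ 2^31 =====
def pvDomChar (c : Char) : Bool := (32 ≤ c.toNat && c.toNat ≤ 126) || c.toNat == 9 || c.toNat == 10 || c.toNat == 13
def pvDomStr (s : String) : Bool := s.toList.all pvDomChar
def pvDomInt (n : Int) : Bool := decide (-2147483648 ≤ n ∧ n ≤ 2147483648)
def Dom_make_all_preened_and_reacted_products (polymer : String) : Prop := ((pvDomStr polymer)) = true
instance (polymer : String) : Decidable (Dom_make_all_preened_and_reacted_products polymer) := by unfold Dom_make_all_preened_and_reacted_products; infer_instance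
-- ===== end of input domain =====

-- B fuses preen + reaction into one stack pass per letter and uses setdefault for grouping; measured constant-factor faster.


-- str.swapcase() on one character (ASCII-exact, shared primitive of both ports)
def swapChar (c : Char) : Char :=
  if PySem.Chars.isupper c then PySem.Chars.lowerChar c
  else if PySem.Chars.islower c then PySem.Chars.upperChar c
  else c

-- string.ascii_uppercase
def asciiUppercase : List Char := "ABCDEFGHIJKLMNOPQRSTUVWXYZ".toList

-- ===== PORT A =====
-- Python's heterogeneous list entries (char or the int 0) are `Option Char`: `0` is `none`.
-- preen_polymer: the index loop over range(len(...)) with in-place assignment; indices are the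
-- loop's own Nat counters, provably in range, so `getD`/`set` are exactly Python's r[i] / r[i]=0.
def preen_polymer (polymer : List Char) (unit : Char) : List Char :=
  let pp : List (Option Char) := polymer.map some
  let pp := (PySem.List.pyRange 0 (PySem.List.len pp) 1).foldl
    (fun pp i =>
      match PySem.List.pyGetD pp i none with
      | some c => if PySem.Chars.upperChar c == unit then PySem.List.pySetD pp i none else pp
      | none => pp) pp
  pp.filterMap id

-- the while-loop of catalyze_reaction; i, j never leave [0, len] (i>0 is tested before i-1)
def catLoop (r : List (Option Char)) (i j : Nat) : List (Option Char) :=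
  if h : j < r.length then
    if (r.getD i none).isNone && decide (0 < i) then
      catLoop r (i - 1) j
    else if ((r.getD i none).isNone && decide (i = 0))
        || !((r.getD i none).map swapChar == r.getD j none) then
      catLoop r j (j + 1)
    else if i = 0 then
      catLoop ((r.set i none).set j none) (j + 1) (j + 2)
    else
      catLoop ((r.set i none).set j none) (i - 1) (j + 1)
  else r
termination_by (r.length - j, i)
decreasing_by
  · exact Prod.Lex.right _ (by simp_all)
  · exact Prod.Lex.left _ _ (by omega)
  · exact Prod.Lex.left _ _ (by simp only [List.length_set]; omega)
  · exact Prod.Lex.left _ _ (by simp only [List.length_set]; omega)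

def catalyze_reaction (polymer : List Char) : List (Option Char) :=
  catLoop (polymer.map some) 0 1

def collapse_product (reaction : List (Option Char)) : List Char :=
  reaction.filterMap id

def make_all_preened_and_reacted_products (polymer : String) : List (Int × List String) :=
  let products : PySem.Dict Int (List String) := PySem.Dict.empty
  let products := asciiUppercase.foldl
    (fun d ch =>
      let prod := collapse_product (catalyze_reaction (preen_polymer polymer.toList ch))
      let k : Int := prod.length
      let d := match d.get? k with          -- `if not products.get(len(prod)):`
        | none => d.insert k []
        | some v => if v == [] then d.insert k [] else d
      d.modify k [] (· ++ [String.ofList prod]))     -- products[len(prod)].append(prod)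
    products
  products.items

-- ===== PORT B =====
-- the Python stack grows at the right; head-of-list is the stack top here
def stackStep (st : List Char) (c : Char) : List Char :=
  match st with
  | t :: rest => if swapChar t == c then rest else c :: st
  | [] => [c]

def make_all_preened_and_reacted_products_alt (polymer : String) : List (Int × List String) :=
  (asciiUppercase.foldl
    (fun d ch =>
      let st := polymer.toList.foldl
        (fun st c => if PySem.Chars.upperChar c == ch then st else stackStep st c) []
      let prod := st.reverse
      let k : Int := prod.length
      (d.setdefault k []).modify k [] (· ++ [String.ofList prod]))
    PySem.Dict.empty).items

-- ===== PRECONDITION & SPEC =====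
def Spec_make_all_preened_and_reacted_products (polymer : String) (out : List (Int × List String)) : Prop := out = make_all_preened_and_reacted_products_alt polymer
instance (polymer : String) (out : List (Int × List String)) : Decidable (Spec_make_all_preened_and_reacted_products polymer out) := by unfold Spec_make_all_preened_and_reacted_products; infer_instance

-- ===== CLAIM (what is proved, stated in full; the proofs are below) =====
def Claim_equal_make_all_preened_and_reacted_products : Prop := ∀ (polymer : String), Dom_make_all_preened_and_reacted_products polymer → Spec_make_all_preened_and_reacted_products polymer (make_all_preened_and_reacted_products polymer)

-- ===== LEMMAS AND PROOFS =====
def resultOf (r : List (Option Char)) (j : Nat) : List Char :=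
  (((r.drop j).filterMap id).foldl stackStep (((r.take j).filterMap id).reverse)).reverse

theorem fm_take_succ (r : List (Option Char)) (j : Nat) (h : j < r.length) :
    (r.take (j + 1)).filterMap id = (r.take j).filterMap id ++ (r[j]).toList := by
  rw [List.take_succ, List.filterMap_append, List.getElem?_eq_getElem h]
  cases r[j] <;> simp

theorem fm_take_zeros (r : List (Option Char)) (a : Nat) :
    ∀ (b : Nat), a ≤ b → (∀ k, a ≤ k → k < b → ∀ hk : k < r.length, r[k] = none) →
    (r.take b).filterMap id = (r.take a).filterMap id := by
  intro b
  induction b with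
  | zero => intro hab _; interval_cases a; rfl
  | succ b ihb =>
    intro hab hz
    rcases Nat.lt_or_ge b r.length with hb | hb
    · rcases Nat.eq_or_lt_of_le hab with rfl | hlt
      · rfl
      · rw [fm_take_succ r b hb, hz b (by omega) (by omega) hb]
        simp only [Option.toList_none, List.append_nil]
        exact ihb (by omega) (fun k hk1 hk2 hk3 => hz k hk1 (by omega) hk3)
    · have hb1 : List.take (b + 1) r = r := List.take_of_length_le (by omega)
      rcases Nat.eq_or_lt_of_le hab with rfl | hlt
      · rw [hb1]
      · have h2 := ihb (by omega) (fun k hk1 hk2 hk3 => hz k hk1 (by omega) hk3)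
        rw [List.take_of_length_le hb] at h2
        rw [hb1, h2]

theorem catLoop_spec : ∀ (r : List (Option Char)) (i j : Nat), i < j →
    (∀ k, i < k → k < j → ∀ hk : k < r.length, r[k] = none) →
    (∀ k, j ≤ k → ∀ hk : k < r.length, (r[k]).isSome = true) →
    (catLoop r i j).filterMap id = resultOf r j := by
  intro r i j
  induction r, i, j using catLoop.induct with
  | case5 r i j h =>
    intro _ _ _
    rw [catLoop, dif_neg h, resultOf, List.take_of_length_le (by omega),
      List.drop_eq_nil_of_le (by omega)]
    simp
  | case1 r i j h hg ih =>
    intro hij hz hs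
    rw [catLoop, dif_pos h, if_pos hg]
    simp only [Bool.and_eq_true, Option.isNone_iff_eq_none, decide_eq_true_eq] at hg
    obtain ⟨hnone, hipos⟩ := hg
    have hilen : i < r.length := by omega
    rw [List.getD_eq_getElem r none hilen] at hnone
    exact ih (by omega)
      (fun k hk1 hk2 hk3 => by
        rcases Nat.lt_or_ge i k with hk | hk
        · exact hz k hk hk2 hk3
        · have hki : k = i := by omega
          subst hki; exact hnone)
      hs
  | case2 r i j h hg1 hg2 ih =>
    intro hij hz hs
    rw [catLoop, dif_pos h, if_neg hg1, if_pos hg2]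
    have hd0 := hs j le_rfl h
    obtain ⟨d, hd⟩ : ∃ d, r[j] = some d := by
      cases hrj : r[j] <;> simp [hrj] at hd0 ⊢
    have hres : resultOf r (j + 1) = resultOf r j := by
      have hstep : stackStep (((r.take j).filterMap id).reverse) d
          = d :: ((r.take j).filterMap id).reverse := by
        by_cases hno : (r.getD i none).isNone
        · -- then i = 0 and the whole prefix is none
          have hi0 : i = 0 := by
            by_contra hne
            exact hg1 (by rw [Bool.and_eq_true]
                          exact ⟨hno, by simpa using Nat.pos_of_ne_zero hne⟩)
          have hfm : (r.take j).filterMap id = (r.take 0).filterMap id := by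
            refine fm_take_zeros r 0 j (by omega) (fun k _ hk2 hk3 => ?_)
            rcases Nat.eq_zero_or_pos k with rfl | hk
            · rw [← List.getD_eq_getElem r none hk3]
              simpa [hi0, Option.isNone_iff_eq_none] using hno
            · exact hz k (by omega) hk2 hk3
          rw [hfm]
          simp [stackStep]
        · obtain ⟨c, hc⟩ : ∃ c, r.getD i none = some c := by
            rcases hrc : r.getD i none with _ | c
            · rw [hrc] at hno; simp at hno
            · exact ⟨c, rfl⟩
          have hmis : ¬ swapChar c = d := by
            rw [hc, List.getD_eq_getElem r none h, hd] at hg2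
            simpa using hg2
          have hilen : i < r.length := by omega
          have hci : r[i] = some c := by rw [← List.getD_eq_getElem r none hilen]; exact hc
          have hfm : (r.take j).filterMap id = (r.take i).filterMap id ++ [c] := by
            rw [fm_take_zeros r (i+1) j (by omega) (fun k hk1 hk2 hk3 => hz k (by omega) hk2 hk3),
              fm_take_succ r i hilen, hci]
            simp
          rw [hfm]
          simp [stackStep, hmis]
      have hcons : ∀ (x : Char) (l : List (Option Char)),
          List.filterMap id (some x :: l) = x :: List.filterMap id l := by
        intro x l; simp
      rw [resultOf, resultOf, fm_take_succ r j h, hd,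
        List.drop_eq_getElem_cons h, hd, hcons,
        (show ((List.filterMap id (r.take j)) ++ (some d).toList).reverse
            = d :: (List.filterMap id (r.take j)).reverse by simp),
        List.foldl_cons, hstep]
    rw [← hres]
    exact ih (by omega) (fun k hk1 hk2 hk3 => by omega)
      (fun k hk1 hk3 => hs k (by omega) hk3)
  | case3 r j hj hg1 hg2 ih =>
    intro hij hz hs
    rw [catLoop, dif_pos hj, if_neg hg1, if_neg hg2, if_pos rfl]
    have h0len : 0 < r.length := by omega
    obtain ⟨c, hc⟩ : ∃ c, r.getD 0 none = some c := by
      rcases hrc : r.getD 0 none with _ | c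
      · exact absurd (by rw [hrc]; simp) hg2
      · exact ⟨c, rfl⟩
    have hc0 : r[0] = some c := by rw [← List.getD_eq_getElem r none h0len]; exact hc
    have hdj : r[j] = some (swapChar c) := by
      simp only [hc, Option.map_some, Option.isNone_some] at hg2
      rw [List.getD_eq_getElem r none hj] at hg2
      simp only [Bool.false_and, Bool.false_or, Bool.not_eq_true', Bool.not_eq_false] at hg2
      cases hrj : r[j] with
      | none => rw [hrj] at hg2; simp at hg2
      | some d => rw [hrj] at hg2; simp at hg2; rw [hg2]
    -- facts about r'
    have hlen' : ((r.set 0 none).set j none).length = r.length := by simp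
    have hget' : ∀ k, k ≠ 0 → k ≠ j → ∀ hk : k < r.length,
        ((r.set 0 none).set j none)[k]'(by simpa using hk) = r[k] := by
      intro k hk0 hkj hk
      rw [List.getElem_set, List.getElem_set]
      simp [Ne.symm hk0, Ne.symm hkj]
    have ihr := ih (by omega)
      (fun k hk1 hk2 _ => by omega)
      (fun k hk1 hk3 => by
        rw [hget' k (by omega) (by omega) (by simpa using hk3)]
        exact hs k (by omega) (by simpa using hk3))
    rw [ihr]
    -- it remains: resultOf r' (j+2) = resultOf r j
    have hprefix : ((r.take j).filterMap id) = [c] := by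
      rw [fm_take_zeros r 1 j (by omega) (fun k hk1 hk2 hk3 => hz k (by omega) hk2 hk3),
        fm_take_succ r 0 h0len, hc0]
      simp
    have hallnone' : ∀ k, k < j + 1 → ∀ hk : k < ((r.set 0 none).set j none).length,
        ((r.set 0 none).set j none)[k] = none := by
      intro k hk1 hk
      rw [List.getElem_set, List.getElem_set]
      rcases Nat.eq_zero_or_pos k with rfl | hkpos
      · simp
      · by_cases hkj : j = k
        · simp [hkj]
        · simp only [hkj, if_false, Ne.symm (by omega : k ≠ 0)]
          exact hz k (by omega) (by omega) (by simpa using hk)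
    have hfm1' : (((r.set 0 none).set j none).take (j+1)).filterMap id = [] := by
      rw [fm_take_zeros _ 0 (j+1) (by omega) (fun k _ hk2 hk3 => hallnone' k hk2 hk3)]
      simp
    have hdrop' : ((r.set 0 none).set j none).drop (j+2) = r.drop (j+2) := by
      rw [List.drop_set, List.drop_set, if_pos (by omega), if_pos (by omega)]
    have hcons : ∀ (x : Char) (l : List (Option Char)),
        List.filterMap id (some x :: l) = x :: List.filterMap id l := by
      intro x l; simp
    have hpop : stackStep [c] (swapChar c) = [] := by simp [stackStep]
    rcases Nat.lt_or_ge (j+1) r.length with hj1 | hj1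
    · obtain ⟨e, he⟩ : ∃ e, r[j+1] = some e := by
        have := hs (j+1) (by omega) hj1
        cases hrj : r[j+1] <;> simp [hrj] at this ⊢
      have he' : ((r.set 0 none).set j none)[j+1]'(by simpa using hj1) = some e := by
        rw [hget' (j+1) (by omega) (by omega) hj1]; exact he
      rw [resultOf, resultOf, hprefix,
        fm_take_succ _ (j+1) (by simpa using hj1), he', hfm1', hdrop',
        List.drop_eq_getElem_cons hj, hdj, hcons,
        List.drop_eq_getElem_cons hj1, he, hcons,
        List.foldl_cons, List.foldl_cons,
        (show [c].reverse = [c] by simp), hpop]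
      simp [stackStep]
    · have htk : ((r.set 0 none).set j none).take (j+2) = ((r.set 0 none).set j none).take (j+1) := by
        rw [List.take_of_length_le (by simpa using by omega : ((r.set 0 none).set j none).length ≤ j+2),
          List.take_of_length_le (by simpa using hj1)]
      rw [resultOf, resultOf, hprefix, htk, hfm1', hdrop',
        List.drop_eq_nil_of_le (by omega : r.length ≤ j + 2),
        List.drop_eq_getElem_cons hj, hdj, hcons,
        List.drop_eq_nil_of_le (by omega : r.length ≤ j + 1),
        List.foldl_cons, (show [c].reverse = [c] by simp), hpop]
      simp
  | case4 r i j h hg1 hg2 hi ih =>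
    intro hij hz hs
    rw [catLoop, dif_pos h, if_neg hg1, if_neg hg2, if_neg hi]
    have hilen : i < r.length := by omega
    have hipos : 0 < i := Nat.pos_of_ne_zero hi
    obtain ⟨c, hc⟩ : ∃ c, r.getD i none = some c := by
      rcases hrc : r.getD i none with _ | c
      · exact absurd (by rw [hrc]; simp [hipos]) hg1
      · exact ⟨c, rfl⟩
    have hci : r[i] = some c := by rw [← List.getD_eq_getElem r none hilen]; exact hc
    have hdj : r[j] = some (swapChar c) := by
      rw [hc, List.getD_eq_getElem r none h] at hg2
      cases hrj : r[j] with
      | none => rw [hrj] at hg2; simp at hg2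
      | some d => rw [hrj] at hg2; simp at hg2; rw [hg2]
    have hget' : ∀ k, k ≠ i → k ≠ j → ∀ hk : k < r.length,
        ((r.set i none).set j none)[k]'(by simpa using hk) = r[k] := by
      intro k hk0 hkj hk
      rw [List.getElem_set, List.getElem_set]
      simp [Ne.symm hk0, Ne.symm hkj]
    have ihr := ih (by omega)
      (fun k hk1 hk2 hk => by
        rw [List.getElem_set, List.getElem_set]
        by_cases hkj : j = k
        · simp [hkj]
        · by_cases hki : i = k
          · simp [hkj, hki]
          · simp only [hkj, hki, if_false]
            exact hz k (by omega) (by omega) (by simpa using hk))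
      (fun k hk1 hk => by
        rw [hget' k (by omega) (by omega) (by simpa using hk)]
        exact hs k (by omega) (by simpa using hk))
    rw [ihr]
    have hprefix : (r.take j).filterMap id = (r.take i).filterMap id ++ [c] := by
      rw [fm_take_zeros r (i+1) j (by omega) (fun k hk1 hk2 hk3 => hz k (by omega) hk2 hk3),
        fm_take_succ r i hilen, hci]
      simp
    have htake' : ((r.set i none).set j none).take i = r.take i := by
      rw [List.take_set, List.take_set,
        List.set_eq_of_length_le (by simp only [List.length_set, List.length_take]; omega),
        List.set_eq_of_length_le (by simp only [List.length_take]; omega)]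
    have hfm' : (((r.set i none).set j none).take (j+1)).filterMap id
        = (r.take i).filterMap id := by
      rw [fm_take_zeros _ i (j+1) (by omega) (fun k hk1 hk2 hk => by
        rw [List.getElem_set, List.getElem_set]
        by_cases hkj : j = k
        · simp [hkj]
        · by_cases hki : i = k
          · simp [hkj, hki]
          · simp only [hkj, hki, if_false]
            exact hz k (by omega) (by omega) (by simpa using hk)), htake']
    have hdrop' : ((r.set i none).set j none).drop (j+1) = r.drop (j+1) := by
      rw [List.drop_set, List.drop_set, if_pos (by omega), if_pos (by omega)]
    have hcons : ∀ (x : Char) (l : List (Option Char)),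
        List.filterMap id (some x :: l) = x :: List.filterMap id l := by
      intro x l; simp
    have hpop : stackStep (c :: ((r.take i).filterMap id).reverse) (swapChar c)
        = ((r.take i).filterMap id).reverse := by simp [stackStep]
    rw [resultOf, resultOf, hprefix, hfm', hdrop',
      List.drop_eq_getElem_cons h, hdj, hcons,
      (show (((r.take i).filterMap id) ++ [c]).reverse
          = c :: ((r.take i).filterMap id).reverse by simp),
      List.foldl_cons]
    rw [hpop]

theorem catalyze_stack_pv (cs : List Char) :
    (catLoop (cs.map some) 0 1).filterMap id = (cs.foldl stackStep []).reverse := by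
  cases cs with
  | nil => rw [catLoop]; simp
  | cons c tl =>
    rw [catLoop_spec _ 0 1 (by omega) (fun k hk1 hk2 hk3 => by omega)
      (fun k hk1 hk3 => by rw [List.getElem_map]; rfl)]
    rw [resultOf]
    simp [stackStep]

theorem b_guard_eq_filter (cs : List Char) (ch : Char) :
    cs.foldl (fun st c => if PySem.Chars.upperChar c == ch then st else stackStep st c) [] =
    (cs.filter (fun c => !(PySem.Chars.upperChar c == ch))).foldl stackStep [] := by
  rw [← PySem.List.foldl_if_eq_foldl_filter (fun c => !(PySem.Chars.upperChar c == ch)) stackStep]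
  exact PySem.List.foldl_congr_mem _ _ _ _ (fun acc x _ => by
    by_cases hx : PySem.Chars.upperChar x == ch <;> simp [hx])

theorem preenLoop_inv (u : Char) (tl : List Char) : ∀ (pre : List (Option Char)),
    (PySem.List.pyRange (pre.length : Int) ((pre.length + tl.length : Nat) : Int) 1).foldl
      (fun pp i =>
        match PySem.List.pyGetD pp i none with
        | some c => if PySem.Chars.upperChar c == u then PySem.List.pySetD pp i none else pp
        | none => pp) (pre ++ tl.map some)
    = pre ++ tl.map (fun c => if PySem.Chars.upperChar c == u then none else some c) := by
  induction tl with
  | nil => intro pre; simp [PySem.List.pyRange_one_eq_nil]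
  | cons c tl ih =>
    intro pre
    rw [PySem.List.pyRange_one_cons (by push_cast [List.length_cons]; omega), List.foldl_cons]
    have hget : PySem.List.pyGetD (pre ++ (c :: tl).map some) ((pre.length : Nat) : Int) none = some c := by
      rw [PySem.List.pyGetD_natCast]; simp [List.getD]
    rw [hget]
    have e1 : ((pre.length : Int) + 1) = (((pre.length + 1 : Nat)) : Int) := by push_cast; ring
    have e2 : (pre.length + (c :: tl).length) = (pre.length + 1 + tl.length) := by
      simp [List.length_cons]; omega
    by_cases hc : PySem.Chars.upperChar c = u
    · have h1 : (pre ++ (c :: tl).map some).set pre.length (none : Option Char)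
          = (pre ++ [none]) ++ tl.map some := by simp
      have h2 := ih (pre ++ [(none : Option Char)])
      simp only [List.length_append, List.length_singleton] at h2
      simp only [hc, beq_self_eq_true, if_true, PySem.List.pySetD_natCast, h1, e1, e2]
      simpa [hc] using h2
    · have h2 := ih (pre ++ [some c])
      simp only [List.length_append, List.length_singleton] at h2
      have hcb : (PySem.Chars.upperChar c == u) = false := by simp [hc]
      simp only [hcb]
      rw [show pre ++ (c :: tl).map some = (pre ++ [some c]) ++ tl.map some by simp]
      simp only [e1, e2]
      simpa [hc] using h2

theorem filterMap_if_eq_filter (p : Char → Bool) (cs : List Char) :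
    (cs.map (fun c => if p c then none else some c)).filterMap id
      = cs.filter (fun c => !(p c)) := by
  induction cs with
  | nil => simp
  | cons c tl ih => by_cases hc : p c <;> simp [hc] <;> simpa [List.filterMap_map, Function.comp] using ih

theorem preen_eq (cs : List Char) (u : Char) :
    preen_polymer cs u = cs.filter (fun c => !(PySem.Chars.upperChar c == u)) := by
  unfold preen_polymer
  have h := preenLoop_inv u cs []
  simp only [List.nil_append, List.length_nil, Nat.zero_add, Nat.cast_zero] at h
  simp only [PySem.List.len_eq, List.length_map]
  rw [h, filterMap_if_eq_filter]

def stepA (g : Char → List Char) (d : PySem.Dict Int (List String)) (ch : Char) :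
    PySem.Dict Int (List String) :=
  let prod := g ch
  let k : Int := prod.length
  let d' := match d.get? k with
    | none => d.insert k []
    | some v => if v == [] then d.insert k [] else d
  d'.modify k [] (· ++ [String.ofList prod])

def stepB (g : Char → List Char) (d : PySem.Dict Int (List String)) (ch : Char) :
    PySem.Dict Int (List String) :=
  let prod := g ch
  let k : Int := prod.length
  (d.setdefault k []).modify k [] (· ++ [String.ofList prod])

theorem keys_insert_of_contains (d : PySem.Dict Int (List String)) (k : Int)
    (v : List String) (h : d.contains k = true) : (d.insert k v).keys = d.keys := by
  simp only [PySem.Dict.keys, PySem.Dict.items_insert_of_contains d v h, List.map_map]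
  apply List.map_congr_left
  intro p hp
  by_cases hpk : p.1 == k
  · simp [Function.comp, Eq.symm (by simpa using hpk : p.1 = k)]
  · simp [Function.comp, hpk]

theorem insert_same_of_get?_eq (d : PySem.Dict Int (List String)) (k : Int)
    (v : List String) (hnd : d.keys.Nodup) (h : d.get? k = some v) : d.insert k v = d := by
  have hcont : d.contains k = true := by
    rw [PySem.Dict.contains_eq_isSome_get?, h]; rfl
  apply PySem.Dict.ext
  rw [PySem.Dict.items_insert_of_contains d v hcont]
  conv_rhs => rw [← List.map_id d.items]
  apply List.map_congr_left
  intro p hp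
  by_cases hpk : p.1 == k
  · have hk : p.1 = k := by simpa using hpk
    have hmem : (k, p.2) ∈ d.items := by rw [← hk]; exact hp
    have := PySem.Dict.get?_of_mem_items d hmem hnd
    rw [h] at this
    simp only [hpk, if_true, id_eq]
    rw [← hk, (by simpa using this : v = p.2)]
  · simp [hpk]

theorem stepA_eq_stepB (g : Char → List Char) (d : PySem.Dict Int (List String)) (ch : Char)
    (hnd : d.keys.Nodup) : stepA g d ch = stepB g d ch := by
  simp only [stepA, stepB]
  rcases hget : d.get? ((g ch).length : Int) with _ | v
  · have hcont : d.contains ((g ch).length : Int) = false := by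
      rw [PySem.Dict.contains_eq_isSome_get?, hget]; rfl
    simp only [PySem.Dict.setdefault_of_not_contains d _ hcont]
  · have hcont : d.contains ((g ch).length : Int) = true := by
      rw [PySem.Dict.contains_eq_isSome_get?, hget]; rfl
    simp only [PySem.Dict.setdefault_of_contains d _ hcont]
    by_cases hv : v = []
    · subst hv
      rw [if_pos (show (([] : List String) == []) = true from rfl),
        insert_same_of_get?_eq d _ [] hnd hget]
    · rw [if_neg (by simpa using hv)]

theorem keys_insert_of_not_contains (d : PySem.Dict Int (List String)) (k : Int)
    (v : List String) (h : d.contains k = false) : (d.insert k v).keys = d.keys ++ [k] := by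
  simp [PySem.Dict.keys, PySem.Dict.items_insert_of_not_contains d v h]

theorem keys_stepB_nodup (g : Char → List Char) (d : PySem.Dict Int (List String)) (ch : Char)
    (hnd : d.keys.Nodup) : (stepB g d ch).keys.Nodup := by
  have hmem : ∀ k : Int, d.contains k = false → k ∉ d.keys := by
    intro k hk
    rw [PySem.Dict.contains_eq_decide_mem_keys] at hk
    simpa using hk
  simp only [stepB]
  rw [PySem.Dict.keys_modify]
  rcases hcont : d.contains ((g ch).length : Int) with _ | _
  · rw [PySem.Dict.setdefault_of_not_contains d _ hcont, PySem.Dict.insert_insert_self,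
      keys_insert_of_not_contains _ _ _ hcont]
    have hni : ((g ch).length : Int) ∉ d.keys := hmem _ hcont
    simp [List.nodup_append, hnd]
    intro a ha heq
    exact hni (heq ▸ ha)
  · rw [PySem.Dict.setdefault_of_contains d _ hcont,
      keys_insert_of_contains _ _ _ hcont]
    exact hnd

theorem fold_eq (g : Char → List Char) : ∀ (l : List Char) (d : PySem.Dict Int (List String)),
    d.keys.Nodup → l.foldl (stepA g) d = l.foldl (stepB g) d := by
  intro l
  induction l with
  | nil => intro d _; rfl
  | cons ch tl ih =>
    intro d hnd
    rw [List.foldl_cons, List.foldl_cons, stepA_eq_stepB g d ch hnd]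
    exact ih _ (keys_stepB_nodup g d ch hnd)

def prodA (cs : List Char) (ch : Char) : List Char :=
  collapse_product (catalyze_reaction (preen_polymer cs ch))

def prodB (cs : List Char) (ch : Char) : List Char :=
  (cs.foldl (fun st c => if PySem.Chars.upperChar c == ch then st else stackStep st c) []).reverse

theorem prodA_eq_prodB (cs : List Char) (ch : Char) : prodA cs ch = prodB cs ch := by
  unfold prodA prodB collapse_product catalyze_reaction
  rw [preen_eq, catalyze_stack_pv, b_guard_eq_filter]

theorem main_eq (polymer : String) :
    make_all_preened_and_reacted_products polymer
      = make_all_preened_and_reacted_products_alt polymer := by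
  have hfun1 : (fun (d : PySem.Dict Int (List String)) (ch : Char) =>
      let prod := collapse_product (catalyze_reaction (preen_polymer polymer.toList ch))
      let k : Int := prod.length
      let d := match d.get? k with
        | none => d.insert k []
        | some v => if v == [] then d.insert k [] else d
      d.modify k [] (· ++ [String.ofList prod]))
      = stepA (prodA polymer.toList) := by
    funext d ch; rfl
  have hfun2 : (fun (d : PySem.Dict Int (List String)) (ch : Char) =>
      let st := polymer.toList.foldl
        (fun st c => if PySem.Chars.upperChar c == ch then st else stackStep st c) []
      let prod := st.reverse
      let k : Int := prod.length
      (d.setdefault k []).modify k [] (· ++ [String.ofList prod]))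
      = stepB (prodB polymer.toList) := by
    funext d ch; rfl
  show (asciiUppercase.foldl _ PySem.Dict.empty).items
      = (asciiUppercase.foldl _ PySem.Dict.empty).items
  rw [hfun1, hfun2]
  refine congrArg PySem.Dict.items ?_
  calc asciiUppercase.foldl (stepA (prodA polymer.toList)) PySem.Dict.empty
      = asciiUppercase.foldl (stepA (prodB polymer.toList)) PySem.Dict.empty :=
        PySem.List.foldl_congr_mem _ _ _ _
          (fun acc x _ => by simp only [stepA, prodA_eq_prodB])
    _ = asciiUppercase.foldl (stepB (prodB polymer.toList)) PySem.Dict.empty :=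
        fold_eq _ asciiUppercase PySem.Dict.empty
          (by rw [PySem.Dict.keys_empty]; exact List.nodup_nil)

-- ===== VERDICT (by name: the statement is the Claim_ definition above) =====
theorem make_all_preened_and_reacted_products_spec : Claim_equal_make_all_preened_and_reacted_products := by
  intro polymer _
  exact main_eq polymer
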